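-- pv_equiv track=rewrite | github.com/Nghia03092004/nghia03092004.github.io | project_euler_unified/problem_447/solution.py | R_brute
-- ===== SOURCE A (Python) =====
-- def R_brute(n: int):
--     """Count retractions by brute force: pairs (a, b) with a^2≡a, ab≡0 mod n."""
--     count = 0
--     for a in range(n):
--         if (a * a) % n != a % n:
--             continue
--         for b in range(n):
--             if (a * b) % n == 0:
--                 count += 1
--     return count
-- ===== SOURCE B (Python) =====
-- def R_brute(n: int):
--     """Count retractions: for each idempotent a mod n, the number of b in
--     [0, n) with a*b % n == 0 is gcd(a, n), so sum gcd(a, n) over those a."""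
--     total = 0
--     for a in range(n):
--         if (a * a) % n == a:
--             x, y = n, a
--             while y:
--                 x, y = y, x % y
--             total += x
--     return total
-- ===== Notes on version B (the rewrite author's own statement) =====
-- stated objective: faster
-- what changed: B drops A's inner scan over all b: for each idempotent a it adds gcd(a, n) (computed by Euclid's algorithm), which equals the number of b in [0,n) with a*b = 0 mod n.
import Mathlib
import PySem

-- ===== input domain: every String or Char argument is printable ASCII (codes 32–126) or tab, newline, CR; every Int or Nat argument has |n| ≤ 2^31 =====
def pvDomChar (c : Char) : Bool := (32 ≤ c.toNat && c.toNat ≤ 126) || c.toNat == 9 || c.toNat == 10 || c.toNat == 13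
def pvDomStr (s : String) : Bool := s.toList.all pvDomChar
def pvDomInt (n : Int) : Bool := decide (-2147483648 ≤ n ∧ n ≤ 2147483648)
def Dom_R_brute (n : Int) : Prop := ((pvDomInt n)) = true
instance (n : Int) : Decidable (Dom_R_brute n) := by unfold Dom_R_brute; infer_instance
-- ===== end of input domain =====

-- B replaces A's inner scan over all b by adding gcd(a, n) per idempotent a (objective: faster).

-- ===== PORT A =====
def R_brute (n : Int) : Int :=
  (PySem.List.pyRange 0 n 1).foldl (fun count a =>
    if PySem.Int.mod (a * a) n ≠ PySem.Int.mod a n then count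
    else (PySem.List.pyRange 0 n 1).foldl
      (fun c b => if PySem.Int.mod (a * b) n = 0 then c + 1 else c) count) 0

-- ===== PORT B =====
-- termination lemma for the Euclid while-loop
theorem pvModAbsLt (x y : Int) (h : y ≠ 0) :
    (PySem.Int.mod x y).natAbs < y.natAbs := by
  rcases lt_or_gt_of_ne h with hneg | hpos
  · have := PySem.Int.mod_neg_bounds x hneg
    omega
  · have h1 := PySem.Int.mod_nonneg x hpos
    have h2 := PySem.Int.mod_lt x hpos
    omega

-- the 'while y: x, y = y, x % y' loop of Source B
def euclidLoop (x y : Int) : Int :=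
  if h : y = 0 then x else euclidLoop y (PySem.Int.mod x y)
termination_by y.natAbs
decreasing_by exact pvModAbsLt x y h

def R_brute_alt (n : Int) : Int :=
  (PySem.List.pyRange 0 n 1).foldl (fun total a =>
    if PySem.Int.mod (a * a) n = a then total + euclidLoop n a else total) 0

-- ===== PRECONDITION & SPEC =====
def Spec_R_brute (n : Int) (out : Int) : Prop := out = R_brute_alt n
instance (n : Int) (out : Int) : Decidable (Spec_R_brute n out) := by unfold Spec_R_brute; infer_instance

-- ===== CLAIM (what is proved, stated in full; the proofs are below) =====
def Claim_equal_R_brute : Prop := ∀ (n : Int), Dom_R_brute n → Spec_R_brute n (R_brute n)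

-- ===== LEMMAS AND PROOFS =====

-- Euclid's loop computes the gcd (on nonnegative inputs)
theorem euclidLoop_eq_gcd (k : Nat) : ∀ (x y : Int), y.natAbs ≤ k → 0 ≤ x → 0 ≤ y →
    euclidLoop x y = (Int.gcd x y : Int) := by
  induction k with
  | zero =>
    intro x y hk hx hy
    have hy0 : y = 0 := by omega
    rw [hy0, euclidLoop]
    simp [Int.natAbs_of_nonneg hx]
  | succ k ih =>
    intro x y hk hx hy
    by_cases h : y = 0
    · rw [h, euclidLoop]; simp [Int.natAbs_of_nonneg hx]
    · rw [euclidLoop]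
      simp only [h, dif_neg, not_false_iff]
      have hypos : 0 < y := lt_of_le_of_ne hy (Ne.symm h)
      have hmod : PySem.Int.mod x y = x % y := PySem.Int.mod_eq_emod_of_pos hypos
      have hlt := pvModAbsLt x y h
      have hrec := ih y (PySem.Int.mod x y) (by omega) hy
        (by rw [hmod]; exact Int.emod_nonneg x h)
      rw [hrec, hmod]
      have : Int.gcd y (x % y) = Int.gcd x y := by
        show Nat.gcd y.natAbs (x % y).natAbs = Nat.gcd x.natAbs y.natAbs
        rw [Int.natAbs_emod_of_nonneg hx y, Nat.gcd_comm,
          ← Nat.gcd_rec, Nat.gcd_comm]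
      rw [this]

-- multiples of m in [0, m*g) number exactly g
theorem card_multiples_range (m g : Nat) (hm : 0 < m) :
    ((Finset.range (m * g)).filter (fun k => m ∣ k)).card = g := by
  have himg : (Finset.range (m * g)).filter (fun k => m ∣ k)
      = (Finset.range g).image (fun i => m * i) := by
    ext k
    simp only [Finset.mem_filter, Finset.mem_range, Finset.mem_image]
    constructor
    · rintro ⟨hk, c, rfl⟩
      exact ⟨c, lt_of_mul_lt_mul_left hk (Nat.zero_le m), rfl⟩
    · rintro ⟨i, hi, rfl⟩
      exact ⟨(Nat.mul_lt_mul_left hm).mpr hi, ⟨i, rfl⟩⟩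
  rw [himg, Finset.card_image_of_injective _ (fun a b h =>
    Nat.eq_of_mul_eq_mul_left hm h), Finset.card_range]

-- the divisibility characterisation: N | A*k ↔ (N / gcd A N) | k
theorem dvd_mul_iff_div_gcd_dvd (N A k : Nat) (hN : 0 < N) :
    N ∣ A * k ↔ (N / Nat.gcd A N) ∣ k := by
  set g := Nat.gcd A N with hg
  have hgpos : 0 < g := Nat.gcd_pos_of_pos_right A hN
  have hgN : g ∣ N := Nat.gcd_dvd_right A N
  have hgA : g ∣ A := Nat.gcd_dvd_left A N
  obtain ⟨m, hm⟩ := hgN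
  obtain ⟨A', hA'⟩ := hgA
  have hdiv : N / g = m := by rw [hm]; exact Nat.mul_div_cancel_left m hgpos
  have hcop : Nat.Coprime A' m := by
    have := Nat.coprime_div_gcd_div_gcd (m := A) (n := N) hgpos
    rwa [← hg, hA', hm, Nat.mul_div_cancel_left A' hgpos, Nat.mul_div_cancel_left m hgpos] at this
  rw [hdiv]
  constructor
  · intro h
    rw [hm, hA', mul_assoc] at h
    have : m ∣ A' * k := (mul_dvd_mul_iff_left (by omega : g ≠ 0)).mp h
    exact Nat.Coprime.dvd_of_dvd_mul_left hcop.symm this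
  · rintro ⟨c, rfl⟩
    rw [hm, hA']
    exact ⟨A' * c, by ring⟩

-- countP over List.range via Finset card
theorem countP_range_eq_card (N : Nat) (p : Nat → Prop) [DecidablePred p] :
    (List.range N).countP (fun k => decide (p k)) = ((Finset.range N).filter p).card := by
  rw [List.countP_eq_length_filter]
  rfl

-- the inner loop of A counts gcd(n, a) ones, for 0 ≤ a < n
theorem inner_count (n a : Int) (hn : 0 < n) (ha : 0 ≤ a) :
    ((PySem.List.pyRange 0 n 1).countP (fun b => decide (PySem.Int.mod (a * b) n = 0)) : Int)
      = (Int.gcd n a : Int) := by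
  rw [PySem.List.pyRange_one, List.countP_map]
  have hpred : ∀ k ∈ List.range (n - 0).toNat,
      ((fun b => decide (PySem.Int.mod (a * b) n = 0)) ∘ (fun k : Nat => (0 : Int) + k)) k
      = decide ((n.toNat / Nat.gcd a.toNat n.toNat) ∣ k) := by
    intro k _
    simp only [Function.comp, zero_add]
    have h1 : (PySem.Int.mod (a * (k : Int)) n = 0) ↔ n ∣ a * (k : Int) :=
      PySem.Int.mod_eq_zero_iff_dvd _ _
    have h2 : (n ∣ a * (k : Int)) ↔ (n.toNat ∣ a.toNat * k) := by
      rw [← Int.natCast_dvd_natCast]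
      push_cast [Int.toNat_of_nonneg ha, Int.toNat_of_nonneg (le_of_lt hn)]
      rfl
    have h3 := dvd_mul_iff_div_gcd_dvd n.toNat a.toNat k (by omega)
    simp only [h1, h2, h3]
  rw [List.countP_congr (fun k hk => iff_of_eq (by rw [hpred k hk]))]
  have hNg : (n - 0).toNat = n.toNat := by omega
  rw [hNg, countP_range_eq_card]
  set g := Nat.gcd a.toNat n.toNat with hg
  have hgpos : 0 < g := Nat.gcd_pos_of_pos_right _ (by omega)
  have hdvd : g ∣ n.toNat := Nat.gcd_dvd_right _ _
  have hmpos : 0 < n.toNat / g := Nat.div_pos (Nat.le_of_dvd (by omega) hdvd) hgpos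
  have hsplit : n.toNat = (n.toNat / g) * g := (Nat.div_mul_cancel hdvd).symm
  have hcard : ((Finset.range ((n.toNat / g) * g)).filter (fun k => (n.toNat / g) ∣ k)).card = g :=
    card_multiples_range (n.toNat / g) g hmpos
  rw [← hsplit] at hcard
  rw [hcard]
  have : Int.gcd n a = g := by
    show Nat.gcd n.natAbs a.natAbs = g
    rw [hg, Nat.gcd_comm]
    congr 1 <;> omega
  rw [this]

-- ===== VERDICT (by name: the statement is the Claim_ definition above) =====
theorem R_brute_spec : Claim_equal_R_brute := by
  intro n _
  unfold Spec_R_brute R_brute R_brute_alt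
  by_cases hn : n ≤ 0
  · rw [PySem.List.pyRange_one_eq_nil hn]
    simp
  · have hn : 0 < n := by omega
    apply PySem.List.foldl_congr_mem
    intro acc a hmem
    rw [PySem.List.mem_pyRange_one] at hmem
    obtain ⟨ha, halt⟩ := hmem
    have hmoda : PySem.Int.mod a n = a := by
      rw [PySem.Int.mod_eq_emod_of_pos hn]
      exact Int.emod_eq_of_lt ha halt
    rw [hmoda]
    by_cases hidem : PySem.Int.mod (a * a) n = a
    · rw [if_neg (by simp [hidem]), if_pos hidem]
      rw [PySem.List.foldl_ite_add_one]
      rw [inner_count n a hn ha]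
      rw [euclidLoop_eq_gcd a.natAbs n a (le_refl _) (le_of_lt hn) ha]
    · rw [if_pos hidem, if_neg hidem]
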